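-- pv_equiv track=rewrite | github.com/WorldofKerry/ToHDL | tests/integration/functions.py | olympic_logo_naive
-- ===== SOURCE A (Python) =====
-- def circle_lines(centre_x: int, centre_y: int, radius: int) -> tuple[int, int]:
--     offset_y = 0
--     offset_x = radius
--     crit = 1 - radius
--     while offset_y <= offset_x:
--         yield (centre_x + offset_x, centre_y + offset_y)  # -- octant 1
--         yield (centre_x + offset_y, centre_y + offset_x)  # -- octant 2
--         yield (centre_x - offset_x, centre_y + offset_y)  # -- octant 4
--         yield (centre_x - offset_y, centre_y + offset_x)  # -- octant 3
--         yield (centre_x - offset_x, centre_y - offset_y)  # -- octant 5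
--         yield (centre_x - offset_y, centre_y - offset_x)  # -- octant 6
--         yield (centre_x + offset_x, centre_y - offset_y)  # -- octant 8
--         yield (centre_x + offset_y, centre_y - offset_x)  # -- octant 7
--         offset_y = offset_y + 1
--         if crit <= 0:
--             crit = crit + 2 * offset_y + 1
--         else:
--             offset_x = offset_x - 1
--             crit = crit + 2 * (offset_y - offset_x) + 1
--
-- def olympic_logo_naive(mid_x, mid_y, radius):
--     spread = radius - 2
--     gen = circle_lines(mid_x, mid_y + spread, radius)
--     for x, y in gen:
--         yield x, y, 50
--     gen = circle_lines(mid_x + spread * 2, mid_y + spread, radius)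
--     for x, y in gen:
--         yield x, y, 180
--     gen = circle_lines(mid_x - spread * 2, mid_y + spread, radius)
--     for x, y in gen:
--         yield x, y, 500
--     gen = circle_lines(mid_x + spread, mid_y - spread, radius)
--     for x, y in gen:
--         yield x, y, 400
--     gen = circle_lines(mid_x - spread, mid_y - spread, radius)
--     for x, y in gen:
--         yield x, y, 300
-- ===== SOURCE B (Python) =====
-- def olympic_logo_naive(mid_x, mid_y, radius):
--     # Precompute the midpoint-circle octant offsets once, then reuse for all five circles.
--     offs = []
--     oy, ox, crit = 0, radius, 1 - radius
--     while oy <= ox: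
--         offs += [(ox, oy), (oy, ox), (-ox, oy), (-oy, ox),
--                  (-ox, -oy), (-oy, -ox), (ox, -oy), (oy, -ox)]
--         oy += 1
--         if crit <= 0:
--             crit += 2 * oy + 1
--         else:
--             ox -= 1
--             crit += 2 * (oy - ox) + 1
--     s = radius - 2
--     for cx, cy, col in [(mid_x, mid_y + s, 50),
--                         (mid_x + 2 * s, mid_y + s, 180),
--                         (mid_x - 2 * s, mid_y + s, 500),
--                         (mid_x + s, mid_y - s, 400),
--                         (mid_x - s, mid_y - s, 300)]:
--         for dx, dy in offs:
--             yield cx + dx, cy + dy, col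
-- ===== Notes on version B (the rewrite author's own statement) =====
-- stated objective: alternative
-- what changed: B runs the midpoint-circle loop once to build a (dx,dy) offset table and then reuses it for all five circles via a nested loop over centers, instead of re-running the Bresenham state machine per circle.
import Mathlib
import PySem

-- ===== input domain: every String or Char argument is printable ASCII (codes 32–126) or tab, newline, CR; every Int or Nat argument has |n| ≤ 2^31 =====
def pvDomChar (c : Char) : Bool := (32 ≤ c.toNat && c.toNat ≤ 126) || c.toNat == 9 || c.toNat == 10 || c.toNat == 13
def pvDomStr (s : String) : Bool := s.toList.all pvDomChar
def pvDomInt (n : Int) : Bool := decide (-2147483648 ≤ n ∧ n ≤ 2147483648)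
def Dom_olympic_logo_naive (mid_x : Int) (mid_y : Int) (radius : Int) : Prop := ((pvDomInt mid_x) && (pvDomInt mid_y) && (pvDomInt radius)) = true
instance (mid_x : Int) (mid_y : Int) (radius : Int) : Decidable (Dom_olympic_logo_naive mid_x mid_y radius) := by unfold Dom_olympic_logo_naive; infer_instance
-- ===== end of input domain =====

-- B computes the Bresenham offset table once and reuses it for the five circles (constant-factor saving).

-- ===== PORT A =====
-- the while-loop of circle_lines; fuel (ox - oy + 1).toNat bounds the iterations (ox - oy strictly decreases)
def circleLoopGo (cx cy : Int) : Nat → Int → Int → Int → List (Int × Int)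
  | 0, _, _, _ => []
  | n + 1, oy, ox, crit =>
    if oy ≤ ox then
      [(cx + ox, cy + oy), (cx + oy, cy + ox), (cx - ox, cy + oy), (cx - oy, cy + ox),
       (cx - ox, cy - oy), (cx - oy, cy - ox), (cx + ox, cy - oy), (cx + oy, cy - ox)] ++
      (if crit ≤ 0 then circleLoopGo cx cy n (oy + 1) ox (crit + 2 * (oy + 1) + 1)
       else circleLoopGo cx cy n (oy + 1) (ox - 1) (crit + 2 * ((oy + 1) - (ox - 1)) + 1))
    else []

def circle_lines (cx cy r : Int) : List (Int × Int) :=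
  circleLoopGo cx cy (r - 0 + 1).toNat 0 r (1 - r)

def olympic_logo_naive (mid_x : Int) (mid_y : Int) (radius : Int) : List (Int × Int × Int) :=
  let spread := radius - 2
  ((circle_lines mid_x (mid_y + spread) radius).map (fun p => (p.1, p.2, (50 : Int)))) ++
  ((circle_lines (mid_x + spread * 2) (mid_y + spread) radius).map (fun p => (p.1, p.2, (180 : Int)))) ++
  ((circle_lines (mid_x - spread * 2) (mid_y + spread) radius).map (fun p => (p.1, p.2, (500 : Int)))) ++
  ((circle_lines (mid_x + spread) (mid_y - spread) radius).map (fun p => (p.1, p.2, (400 : Int)))) ++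
  ((circle_lines (mid_x - spread) (mid_y - spread) radius).map (fun p => (p.1, p.2, (300 : Int))))

-- ===== PORT B =====
-- B's offset-table loop (centre-free midpoint circle), same fuel bound
def offsetsGo : Nat → Int → Int → Int → List (Int × Int)
  | 0, _, _, _ => []
  | n + 1, oy, ox, crit =>
    if oy ≤ ox then
      [(ox, oy), (oy, ox), (-ox, oy), (-oy, ox),
       (-ox, -oy), (-oy, -ox), (ox, -oy), (oy, -ox)] ++
      (if crit ≤ 0 then offsetsGo n (oy + 1) ox (crit + 2 * (oy + 1) + 1)
       else offsetsGo n (oy + 1) (ox - 1) (crit + 2 * ((oy + 1) - (ox - 1)) + 1))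
    else []

def olympic_logo_naive_alt (mid_x : Int) (mid_y : Int) (radius : Int) : List (Int × Int × Int) :=
  let offs := offsetsGo (radius - 0 + 1).toNat 0 radius (1 - radius)
  let s := radius - 2
  ([(mid_x, mid_y + s, (50 : Int)), (mid_x + 2 * s, mid_y + s, 180), (mid_x - 2 * s, mid_y + s, 500),
    (mid_x + s, mid_y - s, 400), (mid_x - s, mid_y - s, 300)] : List (Int × Int × Int)).flatMap
    (fun c => offs.map (fun d => (c.1 + d.1, c.2.1 + d.2, c.2.2)))

-- ===== PRECONDITION & SPEC =====
def Spec_olympic_logo_naive (mid_x : Int) (mid_y : Int) (radius : Int) (out : List (Int × Int × Int)) : Prop := out = olympic_logo_naive_alt mid_x mid_y radius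
instance (mid_x : Int) (mid_y : Int) (radius : Int) (out : List (Int × Int × Int)) : Decidable (Spec_olympic_logo_naive mid_x mid_y radius out) := by unfold Spec_olympic_logo_naive; infer_instance

-- ===== CLAIM (what is proved, stated in full; the proofs are below) =====
def Claim_equal_olympic_logo_naive : Prop := ∀ (mid_x : Int) (mid_y : Int) (radius : Int), Dom_olympic_logo_naive mid_x mid_y radius → Spec_olympic_logo_naive mid_x mid_y radius (olympic_logo_naive mid_x mid_y radius)

-- ===== LEMMAS AND PROOFS =====
theorem circleLoopGo_eq_map (cx cy : Int) (n : Nat) : ∀ (oy ox crit : Int),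
    circleLoopGo cx cy n oy ox crit = (offsetsGo n oy ox crit).map (fun d => (cx + d.1, cy + d.2)) := by
  induction n with
  | zero => intro oy ox crit; rfl
  | succ n ih =>
    intro oy ox crit
    rw [circleLoopGo, offsetsGo]
    split_ifs with h hc
    · rw [ih]; simp [sub_eq_add_neg]
    · rw [ih]; simp [sub_eq_add_neg]
    · rfl

-- ===== VERDICT (by name: the statement is the Claim_ definition above) =====
theorem olympic_logo_naive_spec : Claim_equal_olympic_logo_naive := by
  intro mx my r _
  unfold Spec_olympic_logo_naive olympic_logo_naive olympic_logo_naive_alt circle_lines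
  simp only [List.flatMap_cons, List.flatMap_nil, List.append_nil, circleLoopGo_eq_map,
    List.map_map, List.append_assoc, Function.comp_def]
  ring_nf
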